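-- pv_equiv track=rewrite | github.com/leonormatos/ATP2024 | TPC7/tpc7.py | maxSemChuva
-- ===== SOURCE A (Python) =====
-- def maxSemChuva(tabMeteo, p):
--     consecLocal = 0
--     consecGlobal = 0
--     for data, min, max, prec in tabMeteo:
--         if prec < p:
--             consecLocal += 1
--         else:
--             if consecLocal > consecGlobal:
--                 consecGlobal = consecLocal
--             consecLocal = 0
--     if consecLocal > consecGlobal:
--         consecGlobal = consecLocal
--     return consecGlobal
-- ===== SOURCE B (Python) =====
-- def maxSemChuva(tabMeteo, p):
--     # segment the days into maximal runs of equal key (prec < p), then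
--     # take the max length among the runs whose key is True
--     groups = []
--     rest = tabMeteo
--     while rest:
--         data, min, max_, prec = rest[0]
--         key = prec < p
--         n = 1
--         rest = rest[1:]
--         while rest and (rest[0][3] < p) == key:
--             n += 1
--             rest = rest[1:]
--         groups.append((key, n))
--     best = 0
--     for key, n in groups:
--         if key:
--             best = best if best > n else n
--     return best
-- ===== Notes on version B (the rewrite author's own statement) =====
-- stated objective: alternative
-- what changed: B segments the table into maximal runs of equal key (prec < p) and takes the maximum length over the True-keyed runs, replacing A's local/global running counters and end-of-loop fixup with a group-then-reduce pass.
import Mathlib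
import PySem

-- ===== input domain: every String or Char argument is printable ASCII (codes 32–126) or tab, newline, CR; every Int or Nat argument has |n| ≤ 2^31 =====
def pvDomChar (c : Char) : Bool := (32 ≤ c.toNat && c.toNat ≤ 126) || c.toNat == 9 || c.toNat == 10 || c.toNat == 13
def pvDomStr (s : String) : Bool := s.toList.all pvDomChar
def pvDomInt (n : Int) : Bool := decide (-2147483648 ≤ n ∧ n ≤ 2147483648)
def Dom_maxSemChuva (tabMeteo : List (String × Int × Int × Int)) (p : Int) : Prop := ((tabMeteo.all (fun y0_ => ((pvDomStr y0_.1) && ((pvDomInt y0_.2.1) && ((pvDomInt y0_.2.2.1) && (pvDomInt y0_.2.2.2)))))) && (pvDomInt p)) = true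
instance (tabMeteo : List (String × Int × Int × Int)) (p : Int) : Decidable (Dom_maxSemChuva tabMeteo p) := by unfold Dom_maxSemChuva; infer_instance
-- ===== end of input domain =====

-- B replaces A's local/global running counters (and end-of-loop fixup) by a run-segmentation
-- pass: group consecutive days by the key (prec < p), then take the max length of True runs.


-- ===== PORT A =====
-- the for-loop with its two counters; the [] case is the post-loop fixup + return
def maxSemChuvaLoop (p : Int) : List (String × Int × Int × Int) → Int → Int → Int
  | [], consecLocal, consecGlobal =>
      if consecLocal > consecGlobal then consecLocal else consecGlobal
  | (_, _, _, prec) :: rest, consecLocal, consecGlobal =>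
      if prec < p then maxSemChuvaLoop p rest (consecLocal + 1) consecGlobal
      else maxSemChuvaLoop p rest 0
        (if consecLocal > consecGlobal then consecLocal else consecGlobal)

def maxSemChuva (tabMeteo : List (String × Int × Int × Int)) (p : Int) : Int :=
  maxSemChuvaLoop p tabMeteo 0 0

-- ===== PORT B =====
-- inner while of Source B: count of leading rows whose key (prec < p) equals b, and the rest
def pvTakeRun (p : Int) (b : Bool) : List (String × Int × Int × Int) → Int × List (String × Int × Int × Int)
  | [] => (0, [])
  | x :: xs =>
      if decide (x.2.2.2 < p) = b then
        let r := pvTakeRun p b xs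
        (r.1 + 1, r.2)
      else (0, x :: xs)

theorem pvTakeRun_length (p : Int) (b : Bool) :
    ∀ xs : List (String × Int × Int × Int), (pvTakeRun p b xs).2.length ≤ xs.length := by
  intro xs
  induction xs with
  | nil => simp [pvTakeRun]
  | cons x xs ih =>
      simp only [pvTakeRun]
      split
      · simpa using Nat.le_succ_of_le ih
      · simp

-- outer while of Source B: the list of (key, run length) groups
def pvGroups (p : Int) : List (String × Int × Int × Int) → List (Bool × Int)
  | [] => []
  | x :: xs =>
      let b := decide (x.2.2.2 < p)
      let r := pvTakeRun p b xs
      (b, r.1 + 1) :: pvGroups p r.2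
termination_by xs => xs.length
decreasing_by
  exact Nat.lt_succ_of_le (pvTakeRun_length p _ xs)

-- final for-loop of Source B: best over the True-keyed groups
def pvBest (gs : List (Bool × Int)) : Int :=
  gs.foldl (fun best g => if g.1 then (if best > g.2 then best else g.2) else best) 0

def maxSemChuva_alt (tabMeteo : List (String × Int × Int × Int)) (p : Int) : Int :=
  pvBest (pvGroups p tabMeteo)

-- ===== PRECONDITION & SPEC =====
def Spec_maxSemChuva (tabMeteo : List (String × Int × Int × Int)) (p : Int) (out : Int) : Prop := out = maxSemChuva_alt tabMeteo p
instance (tabMeteo : List (String × Int × Int × Int)) (p : Int) (out : Int) : Decidable (Spec_maxSemChuva tabMeteo p out) := by unfold Spec_maxSemChuva; infer_instance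

-- ===== CLAIM (what is proved, stated in full; the proofs are below) =====
def Claim_equal_maxSemChuva : Prop := ∀ (tabMeteo : List (String × Int × Int × Int)) (p : Int), Dom_maxSemChuva tabMeteo p → Spec_maxSemChuva tabMeteo p (maxSemChuva tabMeteo p)

-- ===== LEMMAS AND PROOFS =====

-- length of the leading run of True-keyed rows, and what follows it
def pvLead (p : Int) : List (String × Int × Int × Int) → Int
  | [] => 0
  | x :: xs => if x.2.2.2 < p then pvLead p xs + 1 else 0

def pvAfter (p : Int) : List (String × Int × Int × Int) → List (String × Int × Int × Int)
  | [] => []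
  | x :: xs => if x.2.2.2 < p then pvAfter p xs else x :: xs

theorem pvLead_nonneg (p : Int) : ∀ xs, 0 ≤ pvLead p xs := by
  intro xs
  induction xs with
  | nil => simp [pvLead]
  | cons x xs ih => simp only [pvLead]; split <;> omega

theorem pvBest_foldl (gs : List (Bool × Int)) :
    ∀ a : Int, 0 ≤ a →
      gs.foldl (fun best g => if g.1 then (if best > g.2 then best else g.2) else best) a
        = max a (pvBest gs) := by
  induction gs with
  | nil => intro a ha; simp [pvBest]; omega
  | cons g gs ih =>
      obtain ⟨b, v⟩ := g
      cases b with
      | false =>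
          intro a ha
          simp only [List.foldl_cons, pvBest, Bool.false_eq_true, if_false]
          exact ih a ha
      | true =>
          intro a ha
          simp only [List.foldl_cons, pvBest, if_true]
          rw [ih _ (by split <;> omega), ih _ (by split <;> omega)]
          split_ifs <;> omega

theorem pvBest_nonneg (gs : List (Bool × Int)) : 0 ≤ pvBest gs := by
  have := pvBest_foldl gs 0 le_rfl
  simp [pvBest] at *
  omega

theorem pvBest_cons_false (v : Int) (gs : List (Bool × Int)) :
    pvBest ((false, v) :: gs) = pvBest gs := by
  simp [pvBest]

theorem pvTakeRun_true (p : Int) :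
    ∀ xs, pvTakeRun p true xs = (pvLead p xs, pvAfter p xs) := by
  intro xs
  induction xs with
  | nil => simp [pvTakeRun, pvLead, pvAfter]
  | cons x xs ih =>
      simp only [pvTakeRun, pvLead, pvAfter]
      by_cases h : x.2.2.2 < p <;> simp [h, ih]

-- skipping the whole leading False run does not change pvBest of the groups
theorem pvGroups_skip_false (p : Int) (xs : List (String × Int × Int × Int)) :
    pvBest (pvGroups p (pvTakeRun p false xs).2) = pvBest (pvGroups p xs) := by
  cases xs with
  | nil => simp [pvTakeRun]
  | cons y ys =>
      by_cases hy : y.2.2.2 < p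
      · have : pvTakeRun p false (y :: ys) = (0, y :: ys) := by
          simp [pvTakeRun, hy]
        rw [this]
      · have hby : decide (y.2.2.2 < p) = false := by simp [hy]
        have hr : pvTakeRun p false (y :: ys)
            = ((pvTakeRun p false ys).1 + 1, (pvTakeRun p false ys).2) := by
          simp [pvTakeRun, hby]
        rw [hr, pvGroups]
        simp only [hby]
        rw [pvBest_cons_false]

-- dropping the head of a False run does not change pvBest of the groups
theorem pvBest_false_cons (p : Int) (x : String × Int × Int × Int) (xs : List (String × Int × Int × Int))
    (hx : ¬ x.2.2.2 < p) :
    pvBest (pvGroups p (x :: xs)) = pvBest (pvGroups p xs) := by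
  rw [pvGroups]
  have hb : decide (x.2.2.2 < p) = false := by simp [hx]
  simp only [hb]
  rw [pvBest_cons_false]
  exact pvGroups_skip_false p xs

theorem pvBest_true_cons (p : Int) (x : String × Int × Int × Int) (xs : List (String × Int × Int × Int))
    (hx : x.2.2.2 < p) :
    pvBest (pvGroups p (x :: xs)) = max (pvLead p xs + 1) (pvBest (pvGroups p (pvAfter p xs))) := by
  rw [pvGroups]
  have hb : decide (x.2.2.2 < p) = true := by simp [hx]
  simp only [hb, pvTakeRun_true]
  simp only [pvBest, List.foldl_cons, if_true]
  have h0 : (if (0:Int) > pvLead p xs + 1 then (0:Int) else pvLead p xs + 1) = pvLead p xs + 1 := by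
    have := pvLead_nonneg p xs
    split <;> omega
  rw [h0]
  exact pvBest_foldl _ _ (by have := pvLead_nonneg p xs; omega)

theorem pvBest_groups_eq (p : Int) (xs : List (String × Int × Int × Int)) :
    pvBest (pvGroups p xs) = max (pvLead p xs) (pvBest (pvGroups p (pvAfter p xs))) := by
  cases xs with
  | nil =>
      simp [pvGroups, pvLead, pvAfter, pvBest]
  | cons x xs =>
      by_cases hx : x.2.2.2 < p
      · rw [pvBest_true_cons p x xs hx]
        simp [pvLead, pvAfter, hx]
      · have h1 : pvLead p (x :: xs) = 0 := by simp [pvLead, hx]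
        have h2 : pvAfter p (x :: xs) = x :: xs := by simp [pvAfter, hx]
        rw [h1, h2]
        have := pvBest_nonneg (pvGroups p (x :: xs))
        omega

theorem maxSemChuvaLoop_eq (p : Int) :
    ∀ (xs : List (String × Int × Int × Int)) (l g : Int), 0 ≤ l → 0 ≤ g →
      maxSemChuvaLoop p xs l g
        = max (max g (l + pvLead p xs)) (pvBest (pvGroups p (pvAfter p xs))) := by
  intro xs
  induction xs with
  | nil =>
      intro l g hl hg
      simp only [maxSemChuvaLoop, pvLead, pvAfter, pvGroups, pvBest, List.foldl_nil]
      split <;> omega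
  | cons x xs ih =>
      intro l g hl hg
      obtain ⟨data, mn, mx, prec⟩ := x
      by_cases hx : prec < p
      · simp only [maxSemChuvaLoop, if_pos hx]
        rw [ih (l + 1) g (by omega) hg]
        have h1 : pvLead p ((data, mn, mx, prec) :: xs) = pvLead p xs + 1 := by
          simp [pvLead, hx]
        have h2 : pvAfter p ((data, mn, mx, prec) :: xs) = pvAfter p xs := by
          simp [pvAfter, hx]
        rw [h1, h2]; ring_nf
      · simp only [maxSemChuvaLoop, if_neg hx]
        rw [ih 0 _ le_rfl (by split <;> omega)]
        have h1 : pvLead p ((data, mn, mx, prec) :: xs) = 0 := by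
          simp [pvLead, hx]
        have h2 : pvAfter p ((data, mn, mx, prec) :: xs) = (data, mn, mx, prec) :: xs := by
          simp [pvAfter, hx]
        rw [h1, h2, pvBest_false_cons p (data, mn, mx, prec) xs hx, pvBest_groups_eq p xs]
        have hn1 := pvLead_nonneg p xs
        have hn2 := pvBest_nonneg (pvGroups p (pvAfter p xs))
        split <;> omega

-- ===== VERDICT (by name: the statement is the Claim_ definition above) =====
theorem maxSemChuva_spec : Claim_equal_maxSemChuva := by
  intro tab p _
  unfold Spec_maxSemChuva maxSemChuva maxSemChuva_alt
  rw [maxSemChuvaLoop_eq p tab 0 0 le_rfl le_rfl]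
  rw [pvBest_groups_eq p tab]
  have h1 := pvLead_nonneg p tab
  have h2 := pvBest_nonneg (pvGroups p (pvAfter p tab))
  omega
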